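-- pv_equiv track=rewrite | github.com/TOLAAJAO/cmpsc-132 | Spring 2026 work/notes/QUIZ ONE REVIEW.py | is_power_of
-- ===== SOURCE A (Python) =====
-- def is_power_of(base, num):
--     """
--         >>> is_power_of(5, 625)  # pow(5, 4) = 5 * 5 * 5 * 5 = 625
--         True
--         >>> is_power_of(5, 1)    # pow(5, 0) = 1
--         True
--         >>> is_power_of(5, 5)    # pow(5, 1) = 5
--         True
--         >>> is_power_of(5, 15)   # 15 is not a power of 5 (it's a multiple)
--         False
--         >>> is_power_of(3, 9)
--         True
--         >>> is_power_of(3, 8)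
--         False
--         >>> is_power_of(3, 10)
--         False
--         >>> is_power_of(1, 8)
--         False
--         >>> is_power_of(2, 0)    # 0 is not a power of any positive base.
--         False
--         >>> is_power_of(4, 16)
--         True
--         >>> is_power_of(4, 64)
--         True
--         >>> is_power_of(4, 63)
--         False
--         >>> is_power_of(4, 65)
--         False
--         >>> is_power_of(4, 32)
--         False
--     """
--     if num == 1:
--         return True
--     if base == 1:
--         return num == 1
--     if num == 0 or num < base:
--         return False
--     if num % base != 0:
--         return False
--     return is_power_of(base, num//base)
-- ===== SOURCE B (Python) =====
-- def is_power_of(base, num):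
--     # Forward check: multiply base up by itself until it reaches or passes num
--     # (in absolute value), then compare.  Degenerate bases 0, 1, -1, whose
--     # powers never grow, are answered directly: their only powers are 1 and
--     # the base itself.
--     if num == 1:
--         return True
--     if base in (0, 1, -1):
--         return num == base
--     p = base
--     while abs(p) < abs(num):
--         p *= base
--     return p == num
-- ===== Notes on version B (the rewrite author's own statement) =====
-- stated objective: alternative
-- what changed: Replaces A's tail recursion that repeatedly divides num down by base with an iterative forward loop that multiplies base up to num and compares, with the degenerate bases 0/1/-1 answered directly.
-- intended difference: For base <= -2 and num an exact power base**k with k >= 3, A returns False because its 'num < base' guard rejects negative powers and its divide-down never revisits them, while B returns True, the intended answer since num really is an integer power of base. — e.g. on is_power_of(-2, -8): A returns false, B returns true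
-- outside the precondition, e.g. on is_power_of(0, 0): A returns False, B returns True
import Mathlib
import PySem

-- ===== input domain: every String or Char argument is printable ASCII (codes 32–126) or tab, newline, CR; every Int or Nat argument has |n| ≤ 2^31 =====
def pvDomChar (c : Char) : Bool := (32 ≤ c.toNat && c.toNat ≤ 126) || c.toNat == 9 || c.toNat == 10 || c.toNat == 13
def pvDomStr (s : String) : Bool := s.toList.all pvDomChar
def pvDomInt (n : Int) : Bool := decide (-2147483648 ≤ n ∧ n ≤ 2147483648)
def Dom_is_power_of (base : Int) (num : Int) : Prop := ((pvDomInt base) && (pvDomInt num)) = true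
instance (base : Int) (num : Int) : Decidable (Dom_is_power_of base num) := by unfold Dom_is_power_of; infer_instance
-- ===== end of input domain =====

-- B replaces A's divide-down tail recursion by a forward multiply-up loop (degenerate
-- bases 0/1/-1 answered directly); B additionally recognises higher powers of negative
-- bases that A wrongly rejects (see D_is_power_of below).


-- ===== PORT A =====
def is_power_of (base : Int) (num : Int) : Bool :=
  if num == 1 then true
  else if base == 1 then num == 1
  else if num == 0 || num < base then false
  else if PySem.Int.mod num base != 0 then false
  else is_power_of base (PySem.Int.floordiv num base)
termination_by (if base = -1 then (if num = -1 then 2 else if 0 < num then 1 else 0) else num.natAbs)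
decreasing_by
  rename_i h1 h2 h3 h4
  simp only [beq_iff_eq, Bool.or_eq_true, decide_eq_true_eq, bne_iff_ne, ne_eq, not_or,
    Decidable.not_not] at h1 h2 h3 h4
  obtain ⟨hn0, hnb⟩ := h3
  have hdiv : PySem.Int.floordiv num base * base = num := by
    have := PySem.Int.floordiv_mul_add_mod num base
    omega
  by_cases hbm : base = -1
  · subst hbm
    split_ifs <;> omega
  · have hb0 : base ≠ 0 := by
      intro h; subst h
      simp [PySem.Int.mod] at h4
      exact hn0 h4
    have hb2 : 2 ≤ base.natAbs := by omega
    have hm0 : PySem.Int.floordiv num base ≠ 0 := by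
      intro h; rw [h] at hdiv; simp at hdiv; omega
    have h5 := Int.natAbs_mul (PySem.Int.floordiv num base) base
    rw [hdiv] at h5
    simp only [if_neg hbm]
    nlinarith [h5, Int.natAbs_pos.mpr hm0, hb2]

-- ===== PORT B =====
def pvAltLoop (base : Int) (num : Int) (p : Int) : Bool :=
  -- the first two conjuncts are totality guards: every call B's Python makes has
  -- |base| ≥ 2 and p a nonzero power of base, so they hold on all reachable calls
  if 1 < base.natAbs ∧ p ≠ 0 ∧ p.natAbs < num.natAbs then pvAltLoop base num (p * base)
  else p == num
termination_by num.natAbs - p.natAbs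
decreasing_by
  rename_i h
  obtain ⟨hb, hp, hlt⟩ := h
  have h1 : (p * base).natAbs = p.natAbs * base.natAbs := Int.natAbs_mul _ _
  have hp1 : 1 ≤ p.natAbs := Int.natAbs_pos.mpr hp
  have h2 : p.natAbs * 2 ≤ (p * base).natAbs := by rw [h1]; nlinarith
  omega

def is_power_of_alt (base : Int) (num : Int) : Bool :=
  if num == 1 then true
  else if base == 0 || base == 1 || base == -1 then num == base
  else pvAltLoop base num base

-- ===== PRECONDITION & SPEC =====
-- Pre_ excludes base = 0 with num ≥ 2, where A raises ZeroDivisionError, and the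
-- defensible corner (0, 0), where whether 0 counts as a power of 0 is anybody's
-- choice (A says False, B says True since 0**1 == 0).
def Pre_is_power_of (base : Int) (num : Int) : Prop :=
  ¬ (base = 0 ∧ (num = 0 ∨ 2 ≤ num))
instance (base : Int) (num : Int) : Decidable (Pre_is_power_of base num) := by
  unfold Pre_is_power_of; infer_instance

def pvWitness_is_power_of : Int × Int := (5, 625)

-- For base ≤ -2 and num an exact power base^k with k ≥ 3, A returns False (its
-- 'num < base' guard rejects negative powers and its divide-down never revisits
-- them) while B returns True, the intended answer since num is a power of base.
-- (k ≤ 32 is no restriction inside Dom: |num| ≤ 2^31 forces k ≤ 31.)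
def D_is_power_of (base : Int) (num : Int) : Prop :=
  base ≤ -2 ∧ ∃ k ∈ Finset.Icc 3 32, base ^ (k : Nat) = num
instance (base : Int) (num : Int) : Decidable (D_is_power_of base num) := by
  unfold D_is_power_of; infer_instance

def Spec_is_power_of (base : Int) (num : Int) (out : Bool) : Prop :=
  ¬ D_is_power_of base num → out = is_power_of_alt base num
instance (base : Int) (num : Int) (out : Bool) : Decidable (Spec_is_power_of base num out) := by
  unfold Spec_is_power_of; infer_instance

def pvDiffWitness_is_power_of : Int × Int := (-2, -8)
def pvDiffWitnessOut_is_power_of : Bool × Bool := (false, true)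

-- ===== CLAIM (what is proved, stated in full; the proofs are below) =====
def Claim_unchanged_is_power_of : Prop := ∀ (base : Int) (num : Int), Dom_is_power_of base num → Pre_is_power_of base num → Spec_is_power_of base num (is_power_of base num)
def Claim_changed_is_power_of : Prop := Dom_is_power_of (pvDiffWitness_is_power_of.1) (pvDiffWitness_is_power_of.2) ∧ Pre_is_power_of (pvDiffWitness_is_power_of.1) (pvDiffWitness_is_power_of.2) ∧ D_is_power_of (pvDiffWitness_is_power_of.1) (pvDiffWitness_is_power_of.2) ∧ is_power_of (pvDiffWitness_is_power_of.1) (pvDiffWitness_is_power_of.2) = pvDiffWitnessOut_is_power_of.1 ∧ is_power_of_alt (pvDiffWitness_is_power_of.1) (pvDiffWitness_is_power_of.2) = pvDiffWitnessOut_is_power_of.2 ∧ pvDiffWitnessOut_is_power_of.1 ≠ pvDiffWitnessOut_is_power_of.2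
def Claim_exact_is_power_of : Prop := ∀ (base : Int) (num : Int), Dom_is_power_of base num → Pre_is_power_of base num → D_is_power_of base num → is_power_of base num ≠ is_power_of_alt base num

-- ===== LEMMAS AND PROOFS =====

theorem exact_div (a b : Int) (h : PySem.Int.mod a b = 0) :
    PySem.Int.floordiv a b * b = a := by
  have := PySem.Int.floordiv_mul_add_mod a b; omega

theorem is_power_of_one (base : Int) : is_power_of base 1 = true := by
  rw [is_power_of]; simp

theorem pvAltLoop_iff (base num : Int) (hb : 1 < base.natAbs) :
    ∀ p : Int, p ≠ 0 → (pvAltLoop base num p = true ↔ ∃ k : Nat, p * base ^ k = num) := by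
  have hb0 : base ≠ 0 := by intro h; subst h; simp at hb
  suffices H : ∀ n : Nat, ∀ p : Int, p ≠ 0 → num.natAbs - p.natAbs = n →
      (pvAltLoop base num p = true ↔ ∃ k : Nat, p * base ^ k = num) from
    fun p hp => H _ p hp rfl
  intro n
  induction n using Nat.strong_induction_on with
  | _ n IH =>
    intro p hp hn
    rw [pvAltLoop]
    by_cases hlt : p.natAbs < num.natAbs
    · rw [if_pos ⟨hb, hp, hlt⟩]
      have hpb : p * base ≠ 0 := mul_ne_zero hp hb0
      have hmul : (p * base).natAbs = p.natAbs * base.natAbs := Int.natAbs_mul _ _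
      have hp1 : 1 ≤ p.natAbs := Int.natAbs_pos.mpr hp
      have hgt : p.natAbs < (p * base).natAbs := by rw [hmul]; nlinarith
      rw [IH (num.natAbs - (p * base).natAbs) (by omega) (p * base) hpb rfl]
      constructor
      · rintro ⟨k, hk⟩
        exact ⟨k + 1, by rw [pow_succ]; linear_combination hk⟩
      · rintro ⟨k, hk⟩
        cases k with
        | zero =>
          exfalso
          have : p = num := by simpa using hk
          omega
        | succ k => exact ⟨k, by rw [pow_succ] at hk; linear_combination hk⟩
    · rw [if_neg (by tauto)]
      simp only [beq_iff_eq]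
      constructor
      · intro h; exact ⟨0, by simpa using h⟩
      · rintro ⟨k, hk⟩
        cases k with
        | zero => simpa using hk
        | succ k =>
          exfalso
          have h1 : num.natAbs = p.natAbs * base.natAbs ^ (k + 1) := by
            rw [← hk, Int.natAbs_mul, Int.natAbs_pow]
          have h2 : 2 ≤ base.natAbs ^ (k + 1) := le_trans (by omega)
            (Nat.le_self_pow (Nat.succ_ne_zero k) base.natAbs)
          have hp1 : 1 ≤ p.natAbs := Int.natAbs_pos.mpr hp
          nlinarith

theorem is_power_of_pos (base : Int) (hb : 2 ≤ base) (num : Int) :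
    is_power_of base num = true ↔ ∃ k : Nat, base ^ k = num := by
  suffices H : ∀ n : Nat, ∀ num : Int, num.natAbs = n →
      (is_power_of base num = true ↔ ∃ k : Nat, base ^ k = num) from H _ num rfl
  intro n
  induction n using Nat.strong_induction_on with
  | _ n IH =>
    intro num hn
    rw [is_power_of]
    by_cases h1 : num = 1
    · subst h1; simp; exact ⟨0, pow_zero base⟩
    · rw [if_neg (by simpa using h1)]
      rw [if_neg (by simp; omega)]
      by_cases h3 : num = 0 ∨ num < base
      · rw [if_pos (by simpa using h3)]
        simp only [Bool.false_eq_true, false_iff, not_exists]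
        intro k hk
        rcases h3 with h | h
        · subst h; exact absurd hk (by positivity)
        · cases k with
          | zero => simp at hk; omega
          | succ k =>
            have : base ^ 1 ≤ base ^ (k + 1) :=
              pow_le_pow_right₀ (by omega) (by omega)
            simp at this; omega
      · rw [if_neg (by simpa using h3)]
        have hn0 : num ≠ 0 := fun h => h3 (Or.inl h)
        have hnb : ¬ num < base := fun h => h3 (Or.inr h)
        by_cases h4 : PySem.Int.mod num base = 0
        · rw [if_neg (by simpa using h4)]
          have hdiv := exact_div num base h4
          set m := PySem.Int.floordiv num base with hm
          have hm0 : m ≠ 0 := by intro h; rw [h] at hdiv; simp at hdiv; omega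
          have hmabs : num.natAbs = m.natAbs * base.natAbs := by
            rw [← hdiv, Int.natAbs_mul]
          have hlt : m.natAbs < num.natAbs := by
            have h1 : 1 ≤ m.natAbs := Int.natAbs_pos.mpr hm0
            have h2 : 2 ≤ base.natAbs := by omega
            nlinarith
          rw [IH m.natAbs (by omega) m rfl]
          constructor
          · rintro ⟨k, hk⟩
            exact ⟨k + 1, by rw [pow_succ, hk, hdiv]⟩
          · rintro ⟨k, hk⟩
            cases k with
            | zero => simp at hk; omega
            | succ k =>
              refine ⟨k, ?_⟩
              rw [pow_succ] at hk
              have : base ^ k * base = m * base := by rw [hk, hdiv]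
              exact mul_right_cancel₀ (by omega) this
        · rw [if_pos (by simpa using h4)]
          simp only [Bool.false_eq_true, false_iff, not_exists]
          intro k hk
          cases k with
          | zero => simp at hk; omega
          | succ k =>
            apply h4
            rw [PySem.Int.mod_eq_zero_iff_dvd]
            exact ⟨base ^ k, by rw [← hk, pow_succ]; ring⟩

theorem is_power_of_negone (num : Int) :
    is_power_of (-1) num = (num == 1 || num == -1) := by
  rw [is_power_of]
  by_cases h1 : num = 1
  · simp [h1]
  · rw [if_neg (by simpa using h1)]
    rw [if_neg (by simp)]
    by_cases h3 : num = 0 ∨ num < -1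
    · rw [if_pos (by simpa using h3)]
      have e1 : num ≠ 1 := by rcases h3 with h | h <;> omega
      have e2 : num ≠ -1 := by rcases h3 with h | h <;> omega
      simp [e1, e2]
    · have hn0 : num ≠ 0 := fun h => h3 (Or.inl h)
      have hnb : ¬ num < -1 := fun h => h3 (Or.inr h)
      rw [if_neg (by simpa using h3)]
      have h4 : PySem.Int.mod num (-1) = 0 := by
        rw [PySem.Int.mod_eq_zero_iff_dvd]; exact ⟨-num, by ring⟩
      rw [if_neg (by simpa using h4)]
      have hfd : PySem.Int.floordiv num (-1) = -num := by
        have := exact_div num (-1) h4; omega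
      rw [hfd]
      by_cases hm1 : num = -1
      · simp [hm1, is_power_of_one]
      · have h2 : 2 ≤ num := by omega
        rw [is_power_of]
        rw [if_neg (by simp; omega)]
        rw [if_neg (by simp)]
        rw [if_pos (by simp; omega)]
        simp; omega

theorem is_power_of_negnum (base num : Int) (hb : base ≤ -2) (hn : num ≤ -1) :
    is_power_of base num = (num == base) := by
  rw [is_power_of]
  rw [if_neg (by simp; omega)]
  rw [if_neg (by simp; omega)]
  by_cases h3 : num < base
  · rw [if_pos (by simp; omega)]
    simp; omega
  · rw [if_neg (by simp; omega)]
    by_cases hnb : num = base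
    · subst hnb
      have h4 : PySem.Int.mod num num = 0 := by
        rw [PySem.Int.mod_eq_zero_iff_dvd]
      rw [if_neg (by simpa using h4)]
      have hfd : PySem.Int.floordiv num num = 1 := by
        have := exact_div num num h4
        have hnum0 : num ≠ 0 := by omega
        have : (PySem.Int.floordiv num num - 1) * num = 0 := by linear_combination this
        rcases mul_eq_zero.mp this with h | h
        · omega
        · omega
      rw [hfd, is_power_of_one]
      simp
    · have h4 : PySem.Int.mod num base ≠ 0 := by
        intro hc0
        rw [PySem.Int.mod_eq_zero_iff_dvd] at hc0
        obtain ⟨c, hc⟩ := hc0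
        -- num = base * c with base < num ≤ -1: forces |num| < |base|, impossible
        rcases lt_trichotomy c 1 with h | h | h
        · nlinarith
        · subst h; simp at hc; omega
        · nlinarith
      rw [if_pos (by simpa using h4)]
      simp; omega

theorem is_power_of_neg (base : Int) (hb : base ≤ -2) (num : Int) :
    is_power_of base num = (num == 1 || num == base || num == base * base) := by
  rw [is_power_of]
  by_cases h1 : num = 1
  · simp [h1]
  · rw [if_neg (by simpa using h1)]
    rw [if_neg (by simp; omega)]
    by_cases h3 : num = 0 ∨ num < base
    · rw [if_pos (by simpa using h3)]
      have e3 : num ≠ base * base := by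
        have : 4 ≤ base * base := by nlinarith
        rcases h3 with h | h <;> omega
      have e2 : num ≠ base := by rcases h3 with h | h <;> omega
      simp [h1, e2, e3]
    · have hn0 : num ≠ 0 := fun h => h3 (Or.inl h)
      have hge : ¬ num < base := fun h => h3 (Or.inr h)
      rw [if_neg (by simpa using h3)]
      by_cases h4 : PySem.Int.mod num base = 0
      · rw [if_neg (by simpa using h4)]
        have hdiv := exact_div num base h4
        set m := PySem.Int.floordiv num base with hm
        have hm0 : m ≠ 0 := by intro h; rw [h] at hdiv; simp at hdiv; omega
        by_cases hneg : num ≤ -1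
        · have hm1 : m = 1 := by
            rcases lt_trichotomy m 1 with h | h | h
            · have hmn : m ≤ -1 := by omega
              nlinarith
            · exact h
            · nlinarith
          have hnb : num = base := by rw [← hdiv, hm1]; ring
          rw [hm1, is_power_of_one]
          simp [hnb]
        · have hpos : 2 ≤ num := by omega
          have hmneg : m ≤ -1 := by
            rcases lt_trichotomy m 0 with h | h | h
            · omega
            · omega
            · nlinarith
          rw [is_power_of_negnum base m hb hmneg]
          have e2 : num ≠ base := by omega
          by_cases hmb : m = base
          · have : num = base * base := by rw [← hdiv, hmb]
            simp [hmb, this]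
          · have e3 : num ≠ base * base := by
              intro h
              apply hmb
              have : m * base = base * base := by rw [hdiv, h]
              exact mul_right_cancel₀ (by omega) this
            rw [beq_eq_false_iff_ne.mpr hmb]
            simp [h1, e2, e3]
      · rw [if_pos (by simpa using h4)]
        have e2 : num ≠ base := by
          intro h
          apply h4
          rw [h, PySem.Int.mod_eq_zero_iff_dvd]
        have e3 : num ≠ base * base := by
          intro h
          apply h4
          rw [h, PySem.Int.mod_eq_zero_iff_dvd]
          exact Dvd.intro_left base rfl
        simp [h1, e2, e3]

theorem dom_natAbs_le (base num : Int) (h : Dom_is_power_of base num) :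
    num.natAbs ≤ 2 ^ 31 := by
  unfold Dom_is_power_of at h
  simp [pvDomInt] at h
  omega

-- ===== VERDICT (by name: the statement is the Claim_ definition above) =====
theorem is_power_of_spec : Claim_unchanged_is_power_of := by
  intro base num hdom hpre
  unfold Spec_is_power_of
  intro hnd
  rw [is_power_of_alt]
  by_cases hn1 : num = 1
  · simp [hn1, is_power_of_one]
  · rw [if_neg (by simpa using hn1)]
    by_cases hbs : base = 0 ∨ base = 1 ∨ base = -1
    · rw [if_pos (by simp; tauto)]
      rcases hbs with h | h | h
      · subst h
        have hnn : num ≤ -1 := by unfold Pre_is_power_of at hpre; omega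
        rw [is_power_of]
        rw [if_neg (by simpa using hn1)]
        rw [if_neg (by simp)]
        rw [if_pos (by simp; omega)]
        simp; omega
      · subst h
        rw [is_power_of]
        rw [if_neg (by simpa using hn1)]
        rw [if_pos (by simp)]
      · subst h
        rw [is_power_of_negone]
        rw [beq_eq_false_iff_ne.mpr hn1]
        simp
    · rw [if_neg (by simp; tauto)]
      have hbabs : 1 < base.natAbs := by omega
      have halt := pvAltLoop_iff base num hbabs base (by omega)
      rcases le_or_gt (2 : Int) base with hb2 | hblt
      · rw [Bool.eq_iff_iff, is_power_of_pos base hb2 num, halt]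
        constructor
        · rintro ⟨k, hk⟩
          cases k with
          | zero => exfalso; apply hn1; simpa using hk.symm
          | succ k => exact ⟨k, by rw [pow_succ] at hk; linear_combination hk⟩
        · rintro ⟨k, hk⟩
          exact ⟨k + 1, by rw [pow_succ]; linear_combination hk⟩
      · have hb2 : base ≤ -2 := by omega
        rw [Bool.eq_iff_iff, is_power_of_neg base hb2 num, halt]
        simp only [Bool.or_eq_true, beq_iff_eq]
        constructor
        · rintro ((h | h) | h)
          · exact absurd h hn1
          · exact ⟨0, by simp [h.symm]⟩
          · exact ⟨1, by rw [pow_one]; linear_combination -h⟩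
        · rintro ⟨k, hk⟩
          match k, hk with
          | 0, hk => exact Or.inl (Or.inr (by simpa using hk.symm))
          | 1, hk => exact Or.inr (by rw [pow_one] at hk; linear_combination -hk)
          | (j + 2), hk =>
            exfalso
            apply hnd
            have hj : base ^ (j + 3) = num := by rw [pow_succ']; exact hk
            have hnabs : num.natAbs = base.natAbs ^ (j + 3) := by
              rw [← hj, Int.natAbs_pow]
            have h2j : 2 ^ (j + 3) ≤ base.natAbs ^ (j + 3) :=
              Nat.pow_le_pow_left (by omega) _
            have hdb := dom_natAbs_le base num hdom
            have hjle : j + 3 ≤ 31 := by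
              by_contra hcc
              have h32 : (2 : Nat) ^ 32 ≤ 2 ^ (j + 3) :=
                Nat.pow_le_pow_right (by omega) (by omega)
              have : (2 : Nat) ^ 31 < 2 ^ 32 := by norm_num
              omega
            exact ⟨hb2, j + 3, Finset.mem_Icc.mpr ⟨by omega, by omega⟩, hj⟩

theorem is_power_of_changed : Claim_changed_is_power_of := by
  unfold Claim_changed_is_power_of
  refine ⟨by decide, by decide, by decide, ?_, ?_, by decide⟩
  · show is_power_of (-2) (-8) = false
    rw [is_power_of]; norm_num
  · show is_power_of_alt (-2) (-8) = true
    rw [is_power_of_alt]; norm_num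
    rw [pvAltLoop]; norm_num
    rw [pvAltLoop]; norm_num
    rw [pvAltLoop]; norm_num

theorem is_power_of_tight : Claim_exact_is_power_of := by
  intro base num hdom hpre hd
  obtain ⟨hb2, j, hjmem, hj⟩ := hd
  rw [Finset.mem_Icc] at hjmem
  have hnabs : num.natAbs = base.natAbs ^ j := by rw [← hj, Int.natAbs_pow]
  have hbabs : 2 ≤ base.natAbs := by omega
  have h3j : base.natAbs ^ 3 ≤ base.natAbs ^ j :=
    Nat.pow_le_pow_right (by omega) (by omega)
  have hcube : base.natAbs ^ 3 = base.natAbs * base.natAbs * base.natAbs := by ring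
  have e1 : num ≠ 1 := by
    intro h; rw [h] at hnabs; simp at hnabs; nlinarith
  have e2 : num ≠ base := by
    intro h; rw [h] at hnabs; nlinarith
  have e3 : num ≠ base * base := by
    intro h
    have : num.natAbs = base.natAbs * base.natAbs := by
      rw [h, Int.natAbs_mul]
    nlinarith
  have hA : is_power_of base num = false := by
    rw [is_power_of_neg base hb2 num]
    simp [e1, e2, e3]
  have hB : is_power_of_alt base num = true := by
    rw [is_power_of_alt]
    rw [if_neg (by simpa using e1)]
    rw [if_neg (by simp; omega)]
    rw [pvAltLoop_iff base num (by omega) base (by omega)]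
    obtain ⟨j', rfl⟩ : ∃ j', j = j' + 1 := ⟨j - 1, by omega⟩
    exact ⟨j', by rw [← hj, pow_succ']⟩
  rw [hA, hB]; decide
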